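-- pv_equiv track=rewrite | github.com/hoangtv090103/PTTKTT-Nhom-C | common_algo_functions.py | add_newlines_by_spaces
-- ===== SOURCE A (Python) =====
-- def add_newlines_by_spaces(string, line_length):
--     """Return a version of the passed string where spaces (or hyphens) get replaced with a new line if the accumulated number of characters has exceeded the specified line length"""
--
--     replacement_indices = set()
--     current_length = 0
--
--     for i, char in enumerate(string):
--         current_length += 1
--         if current_length > line_length and (char == " " or char == "-"):
--             replacement_indices.add(i)
--             current_length = 0
--
--     return "".join(
--         [("\n" if i in replacement_indices else char) for i, char in enumerate(string)]
--     )
-- ===== SOURCE B (Python) =====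
-- def add_newlines_by_spaces(string, line_length):
--     """Single pass: emit characters into a buffer, replacing a space/hyphen
--     with a newline once the accumulated length exceeds line_length."""
--     out = []
--     current_length = 0
--     for char in string:
--         current_length += 1
--         if current_length > line_length and (char == " " or char == "-"):
--             out.append("\n")
--             current_length = 0
--         else:
--             out.append(char)
--     return "".join(out)
-- ===== Notes on version B (the rewrite author's own statement) =====
-- stated objective: simpler
-- what changed: Replaces A's two-pass design (first collect a set of replacement indices, then rebuild the string by membership tests) with a single pass that emits each output character directly, needing no index set and no enumerate.
import Mathlib
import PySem

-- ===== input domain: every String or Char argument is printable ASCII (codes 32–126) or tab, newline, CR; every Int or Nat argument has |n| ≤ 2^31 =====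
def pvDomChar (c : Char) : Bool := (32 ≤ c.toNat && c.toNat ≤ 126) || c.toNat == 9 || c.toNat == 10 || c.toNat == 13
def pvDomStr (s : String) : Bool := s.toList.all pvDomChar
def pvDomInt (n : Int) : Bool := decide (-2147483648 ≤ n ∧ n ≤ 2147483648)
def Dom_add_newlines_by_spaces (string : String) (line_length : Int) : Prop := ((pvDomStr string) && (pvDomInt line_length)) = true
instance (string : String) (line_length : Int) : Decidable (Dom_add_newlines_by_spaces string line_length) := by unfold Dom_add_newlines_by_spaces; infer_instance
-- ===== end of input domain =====

-- B replaces A's two-pass design (collect a replacement-index set, then rebuild by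
-- membership tests) with a single pass emitting each output character directly (simpler).

-- ===== PORT A =====
-- first loop of A: accumulate (replacement_indices, current_length) over enumerate(string)
def pvALoop (line_length : Int) : List (Int × Char) → PySem.Set Int → Int → PySem.Set Int × Int
  | [], s, cur => (s, cur)
  | (i, c) :: rest, s, cur =>
    let cur := cur + 1
    if cur > line_length ∧ (c = ' ' ∨ c = '-') then pvALoop line_length rest (PySem.Set.add s i) 0
    else pvALoop line_length rest s cur

def add_newlines_by_spaces (string : String) (line_length : Int) : String :=
  let replacement_indices :=
    (pvALoop line_length (PySem.List.enumerate string.toList) PySem.Set.empty 0).1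
  String.ofList ((PySem.List.enumerate string.toList).map
    (fun ic => if ic.1 ∈ replacement_indices then '\n' else ic.2))

-- ===== PORT B =====
-- single loop of B: emit output characters while tracking current_length
def pvBLoop (line_length : Int) : List Char → Int → List Char
  | [], _ => []
  | c :: rest, cur =>
    let cur := cur + 1
    if cur > line_length ∧ (c = ' ' ∨ c = '-') then '\n' :: pvBLoop line_length rest 0
    else c :: pvBLoop line_length rest cur

def add_newlines_by_spaces_alt (string : String) (line_length : Int) : String :=
  String.ofList (pvBLoop line_length string.toList 0)

-- ===== PRECONDITION & SPEC =====
def Spec_add_newlines_by_spaces (string : String) (line_length : Int) (out : String) : Prop := out = add_newlines_by_spaces_alt string line_length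
instance (string : String) (line_length : Int) (out : String) : Decidable (Spec_add_newlines_by_spaces string line_length out) := by unfold Spec_add_newlines_by_spaces; infer_instance

-- ===== CLAIM (what is proved, stated in full; the proofs are below) =====
def Claim_equal_add_newlines_by_spaces : Prop := ∀ (string : String) (line_length : Int), Dom_add_newlines_by_spaces string line_length → Spec_add_newlines_by_spaces string line_length (add_newlines_by_spaces string line_length)

-- ===== LEMMAS AND PROOFS =====

-- pvALoop only ADDS indices: membership of an index below the start index is unchanged.
theorem pvALoop_mem_lt (L : Int) (xs : List Char) (i0 : Int) (s : PySem.Set Int) (cur j : Int)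
    (hj : j < i0) :
    (j ∈ (pvALoop L (PySem.List.enumerate xs i0) s cur).1) ↔ j ∈ s := by
  induction xs generalizing i0 s cur with
  | nil => simp [PySem.List.enumerate, pvALoop]
  | cons c rest ih =>
    simp only [PySem.List.enumerate_cons, pvALoop]
    split_ifs with h
    · rw [ih (i0 + 1) _ _ (by omega)]
      simp [PySem.Set.mem_add]
      omega
    · exact ih (i0 + 1) _ _ (by omega)

-- main invariant: rendering the suffix by membership in the FINAL set equals B's direct emission
theorem pvMain (L : Int) (xs : List Char) (i0 : Int) (s : PySem.Set Int) (cur : Int)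
    (hs : ∀ j ∈ s, j < i0) :
    (PySem.List.enumerate xs i0).map
      (fun ic => if ic.1 ∈ (pvALoop L (PySem.List.enumerate xs i0) s cur).1 then '\n' else ic.2)
      = pvBLoop L xs cur := by
  induction xs generalizing i0 s cur with
  | nil => simp [PySem.List.enumerate, pvBLoop]
  | cons c rest ih =>
    simp only [PySem.List.enumerate_cons, pvALoop, pvBLoop, List.map_cons]
    by_cases h : cur + 1 > L ∧ (c = ' ' ∨ c = '-')
    · simp only [if_pos h]
      have hmem : i0 ∈ (pvALoop L (PySem.List.enumerate rest (i0 + 1)) (PySem.Set.add s i0) 0).1 := by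
        rw [pvALoop_mem_lt L rest (i0 + 1) _ 0 i0 (by omega)]
        simp [PySem.Set.mem_add]
      rw [if_pos hmem, ih (i0 + 1) (PySem.Set.add s i0) 0
        (by intro j hj; rw [PySem.Set.mem_add] at hj; rcases hj with hj | hj
            · exact lt_trans (hs j hj) (by omega)
            · omega)]
    · simp only [if_neg h]
      have hmem : i0 ∉ (pvALoop L (PySem.List.enumerate rest (i0 + 1)) s (cur + 1)).1 := by
        rw [pvALoop_mem_lt L rest (i0 + 1) _ _ i0 (by omega)]
        intro hc; exact absurd (hs i0 hc) (by omega)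
      rw [if_neg hmem, ih (i0 + 1) s (cur + 1) (fun j hj => lt_trans (hs j hj) (by omega))]

-- ===== VERDICT (by name: the statement is the Claim_ definition above) =====
theorem add_newlines_by_spaces_spec : Claim_equal_add_newlines_by_spaces := by
  intro string line_length _
  unfold Spec_add_newlines_by_spaces add_newlines_by_spaces add_newlines_by_spaces_alt
  exact congrArg String.ofList
    (pvMain line_length string.toList 0 PySem.Set.empty 0 (by intro j hj; simp [PySem.Set.empty] at hj))
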